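-- pv_equiv track=rewrite | github.com/PeterVL02/hungakid | src/commands/command.py | _recombine_bracketed_tokens
-- ===== SOURCE A (Python) =====
-- def _recombine_bracketed_tokens(tokens: list[str]) -> list[str]:
--     """
--     Recombine any tokens that start with '[' and don't end with ']' until
--     we reach a token that does, effectively gluing them back together.
--     """
--     result = []
--     i = 0
--     while i < len(tokens):
--         token = tokens[i]
--         # If a token starts with '[' but does not end with ']',
--         # accumulate tokens until we find the one that ends with ']'.
--         if token.startswith("[") and not token.endswith("]"):
--             bracketed_parts = [token]
--             i += 1
--             # Keep appending tokens until we find one that ends with ']'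
--             while i < len(tokens) and not tokens[i].endswith("]"):
--                 bracketed_parts.append(tokens[i])
--                 i += 1
--             # If we haven't run out of tokens, include the closing part
--             if i < len(tokens):
--                 bracketed_parts.append(tokens[i])
--                 i += 1
--             # Join them with space (or no space, depending on your needs)
--             combined = " ".join(bracketed_parts)
--             result.append(combined)
--         else:
--             result.append(token)
--             i += 1
--     return result
-- ===== SOURCE B (Python) =====
-- def _recombine_bracketed_tokens(tokens: list[str]) -> list[str]:
--     result = []
--     buffer = None
--     for token in tokens:
--         if buffer is None:
--             if token.startswith("[") and not token.endswith("]"):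
--                 buffer = [token]
--             else:
--                 result.append(token)
--         else:
--             buffer.append(token)
--             if token.endswith("]"):
--                 result.append(" ".join(buffer))
--                 buffer = None
--     if buffer is not None:
--         result.append(" ".join(buffer))
--     return result
-- ===== Notes on version B (the rewrite author's own statement) =====
-- stated objective: simpler
-- what changed: Replaced A's nested while loops with manual index management by a single flat for-loop state machine driven by one Optional buffer that collects bracket-group parts and is flushed on the closing token (or at end of input).
import Mathlib
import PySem

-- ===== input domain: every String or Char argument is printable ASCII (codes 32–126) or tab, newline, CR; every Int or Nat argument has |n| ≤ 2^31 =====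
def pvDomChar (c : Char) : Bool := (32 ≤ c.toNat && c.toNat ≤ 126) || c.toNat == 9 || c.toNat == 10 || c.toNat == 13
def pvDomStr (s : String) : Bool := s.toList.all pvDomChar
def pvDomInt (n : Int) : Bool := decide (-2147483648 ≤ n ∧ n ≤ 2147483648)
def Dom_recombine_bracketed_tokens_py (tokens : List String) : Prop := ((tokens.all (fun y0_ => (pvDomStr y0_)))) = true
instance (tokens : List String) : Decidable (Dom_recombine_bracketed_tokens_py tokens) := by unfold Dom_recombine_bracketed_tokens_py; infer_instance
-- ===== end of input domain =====

-- B replaces A's nested while loops by one flat pass with an Option buffer; objective: simpler.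

-- ===== PORT A =====
-- A's inner while loop: consume tokens until one ends with "]" (inclusive);
-- returns (collected parts, remaining tokens).
def pvCollect : List String → (List String × List String)
  | [] => ([], [])
  | t :: rest =>
    if PySem.Str.endswith t "]" then ([t], rest)
    else
      let pr := pvCollect rest
      (t :: pr.1, pr.2)

-- needed by the port's termination proof
theorem pvCollect_snd_length_le (ts : List String) : (pvCollect ts).2.length ≤ ts.length := by
  induction ts with
  | nil => simp [pvCollect]
  | cons t rest ih =>
    simp only [pvCollect]
    split
    · simp
    · simpa using Nat.le_succ_of_le ih

def recombine_bracketed_tokens_py : List String → List String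
  | [] => []
  | t :: rest =>
    if PySem.Str.startswith t "[" && !(PySem.Str.endswith t "]") then
      let pr := pvCollect rest
      PySem.Str.join " " (t :: pr.1) :: recombine_bracketed_tokens_py pr.2
    else
      t :: recombine_bracketed_tokens_py rest
  termination_by ts => ts.length
  decreasing_by
  · exact Nat.lt_succ_of_le (pvCollect_snd_length_le rest)
  · simp

-- ===== PORT B =====
-- one step of B's for-loop: state = (result so far, Optional buffer)
def pvStep (st : List String × Option (List String)) (token : String) : List String × Option (List String) :=
  match st.2 with
  | none =>
    if PySem.Str.startswith token "[" && !(PySem.Str.endswith token "]") then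
      (st.1, some [token])
    else
      (st.1 ++ [token], none)
  | some buf =>
    let buf' := buf ++ [token]
    if PySem.Str.endswith token "]" then
      (st.1 ++ [PySem.Str.join " " buf'], none)
    else
      (st.1, some buf')

def recombine_bracketed_tokens_py_alt (tokens : List String) : List String :=
  let st := tokens.foldl pvStep ([], none)
  match st.2 with
  | none => st.1
  | some buf => st.1 ++ [PySem.Str.join " " buf]

-- ===== PRECONDITION & SPEC =====
def Spec_recombine_bracketed_tokens_py (tokens : List String) (out : List String) : Prop := out = recombine_bracketed_tokens_py_alt tokens
instance (tokens : List String) (out : List String) : Decidable (Spec_recombine_bracketed_tokens_py tokens out) := by unfold Spec_recombine_bracketed_tokens_py; infer_instance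

-- ===== CLAIM (what is proved, stated in full; the proofs are below) =====
def Claim_equal_recombine_bracketed_tokens_py : Prop := ∀ (tokens : List String), Dom_recombine_bracketed_tokens_py tokens → Spec_recombine_bracketed_tokens_py tokens (recombine_bracketed_tokens_py tokens)

-- ===== LEMMAS AND PROOFS =====
-- finalize B's loop state (the post-loop flush)
def pvFin (st : List String × Option (List String)) : List String :=
  match st.2 with
  | none => st.1
  | some buf => st.1 ++ [PySem.Str.join " " buf]

theorem pvFin_some (rest : List String) :
    ∀ (buf res : List String),
      pvFin (rest.foldl pvStep (res, some buf)) =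
      pvFin ((pvCollect rest).2.foldl pvStep
        (res ++ [PySem.Str.join " " (buf ++ (pvCollect rest).1)], none)) := by
  induction rest with
  | nil => intro buf res; simp [pvCollect, pvFin]
  | cons x xs ih =>
    intro buf res
    by_cases h : PySem.Chars.endswith x.toList [']'] = true
    · have hs : pvStep (res, some buf) x = (res ++ [PySem.Str.join " " (buf ++ [x])], none) := by
        simp [pvStep, h]
      simp [List.foldl_cons, hs, pvCollect, h]
    · have hs : pvStep (res, some buf) x = (res, some (buf ++ [x])) := by
        simp [pvStep, h]
      rw [List.foldl_cons, hs, ih]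
      simp [pvCollect, h]

theorem pvFin_none :
    ∀ (n : Nat) (ts : List String), ts.length ≤ n → ∀ (res : List String),
      pvFin (ts.foldl pvStep (res, none)) = res ++ recombine_bracketed_tokens_py ts := by
  intro n
  induction n with
  | zero =>
    intro ts h res
    have : ts = [] := List.eq_nil_of_length_eq_zero (Nat.le_zero.mp h)
    subst this
    simp [pvFin, recombine_bracketed_tokens_py]
  | succ m ih =>
    intro ts h res
    match ts with
    | [] => simp [pvFin, recombine_bracketed_tokens_py]
    | t :: rest =>
      rw [recombine_bracketed_tokens_py]
      by_cases hc : (PySem.Str.startswith t "[" && !(PySem.Str.endswith t "]")) = true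
      · simp only [List.foldl_cons, pvStep, hc, if_true]
        rw [pvFin_some]
        rw [ih _ (Nat.le_trans (pvCollect_snd_length_le rest) (Nat.succ_le_succ_iff.mp h))]
        simp
      · simp only [List.foldl_cons, pvStep, hc, Bool.false_eq_true, if_false]
        rw [ih _ (Nat.succ_le_succ_iff.mp h)]
        simp

-- ===== VERDICT (by name: the statement is the Claim_ definition above) =====
theorem recombine_bracketed_tokens_py_spec : Claim_equal_recombine_bracketed_tokens_py := by
  intro tokens _
  unfold Spec_recombine_bracketed_tokens_py recombine_bracketed_tokens_py_alt
  have := pvFin_none tokens.length tokens (Nat.le_refl _) []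
  simpa [pvFin] using this.symm
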